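-- pv_equiv track=rewrite | github.com/flower-blossom/p-median | operatorAlns.py | getUnvisitedPoint
-- ===== SOURCE A (Python) =====
-- def getUnvisitedPoint(solutionList, quantityOfPoint, depot):
--     pointInList = []
--     for cluster in solutionList:
--         pointInList += cluster
--     unvisitedPoint = [point for point in range(quantityOfPoint)
--                       if point not in [depot]
--                       if point not in pointInList]
--     return unvisitedPoint
-- ===== SOURCE B (Python) =====
-- def getUnvisitedPoint(solutionList, quantityOfPoint, depot):
--     # Gap extraction: collect visited points, keep the in-range ones sorted,
--     # then emit the runs of the complement between consecutive boundaries.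
--     seen = {depot}
--     for cluster in solutionList:
--         seen.update(cluster)
--     boundaries = sorted(v for v in seen if 0 <= v < quantityOfPoint)
--     result = []
--     start = 0
--     for v in boundaries:
--         result.extend(range(start, v))
--         start = v + 1
--     result.extend(range(start, quantityOfPoint))
--     return result
-- ===== Notes on version B (the rewrite author's own statement) =====
-- stated objective: faster
-- what changed: B never membership-tests the range points at all: it collects the visited points into a set, sorts the in-range ones, and emits the unvisited result as runs (range extensions) between consecutive sorted boundaries — a sort-and-gap-scan instead of A's per-point scan of the concatenated cluster list.
import Mathlib
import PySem

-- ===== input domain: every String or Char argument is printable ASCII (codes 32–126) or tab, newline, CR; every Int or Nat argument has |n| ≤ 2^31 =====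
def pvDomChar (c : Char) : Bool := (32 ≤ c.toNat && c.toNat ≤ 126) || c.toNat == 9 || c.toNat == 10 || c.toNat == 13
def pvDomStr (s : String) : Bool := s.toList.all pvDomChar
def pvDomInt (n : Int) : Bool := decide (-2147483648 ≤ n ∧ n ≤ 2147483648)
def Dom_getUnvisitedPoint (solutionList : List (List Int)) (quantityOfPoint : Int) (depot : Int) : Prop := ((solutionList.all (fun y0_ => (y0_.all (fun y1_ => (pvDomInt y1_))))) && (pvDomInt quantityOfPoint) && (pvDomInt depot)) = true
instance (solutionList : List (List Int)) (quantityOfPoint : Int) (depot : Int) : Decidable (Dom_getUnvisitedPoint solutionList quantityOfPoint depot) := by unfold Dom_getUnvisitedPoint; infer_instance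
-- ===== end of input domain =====

-- B replaces A's per-point membership scan of the concatenated cluster list by a sort-and-gap-scan:
-- sort the in-range visited points and emit the complement as runs between boundaries; objective: faster.

-- ===== PORT A =====
def getUnvisitedPoint (solutionList : List (List Int)) (quantityOfPoint : Int) (depot : Int) : List Int :=
  -- pointInList = []; for cluster in solutionList: pointInList += cluster
  let pointInList : List Int := solutionList.foldl (fun acc cluster => acc ++ cluster) []
  -- [point for point in range(quantityOfPoint) if point not in [depot] if point not in pointInList]
  (PySem.List.pyRange 0 quantityOfPoint 1).filter
    (fun point => !(([depot] : List Int).contains point) && !(pointInList.contains point))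

-- ===== PORT B =====
def getUnvisitedPoint_alt (solutionList : List (List Int)) (quantityOfPoint : Int) (depot : Int) : List Int :=
  -- seen = {depot}; for cluster in solutionList: seen.update(cluster)
  let seen : PySem.Set Int := PySem.Set.ofList [depot]
  let seen := solutionList.foldl (fun s cluster => PySem.Set.update s cluster) seen
  -- boundaries = sorted(v for v in seen if 0 <= v < quantityOfPoint)
  let boundaries :=
    PySem.List.sorted (seen.filter (fun v => decide (0 ≤ v) && decide (v < quantityOfPoint)))
      (fun x => x) false
  -- result = []; start = 0; for v in boundaries: result.extend(range(start, v)); start = v + 1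
  let p := boundaries.foldl
    (fun (p : List Int × Int) v => (p.1 ++ PySem.List.pyRange p.2 v 1, v + 1))
    (([] : List Int), (0 : Int))
  -- result.extend(range(start, quantityOfPoint)); return result
  p.1 ++ PySem.List.pyRange p.2 quantityOfPoint 1

-- ===== PRECONDITION & SPEC =====
def Spec_getUnvisitedPoint (solutionList : List (List Int)) (quantityOfPoint : Int) (depot : Int) (out : List Int) : Prop := out = getUnvisitedPoint_alt solutionList quantityOfPoint depot
instance (solutionList : List (List Int)) (quantityOfPoint : Int) (depot : Int) (out : List Int) : Decidable (Spec_getUnvisitedPoint solutionList quantityOfPoint depot out) := by unfold Spec_getUnvisitedPoint; infer_instance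

-- ===== CLAIM =====
def Claim_equal_getUnvisitedPoint : Prop := ∀ (solutionList : List (List Int)) (quantityOfPoint : Int) (depot : Int), Dom_getUnvisitedPoint solutionList quantityOfPoint depot → Spec_getUnvisitedPoint solutionList quantityOfPoint depot (getUnvisitedPoint solutionList quantityOfPoint depot)

-- ===== LEMMAS AND PROOFS =====

-- membership in the accumulated 'seen' set is membership in the flattened clusters (or the seed)
theorem mem_foldl_update (sl : List (List Int)) (s : PySem.Set Int) (x : Int) :
    x ∈ sl.foldl (fun s c => PySem.Set.update s c) s ↔ x ∈ s ∨ x ∈ sl.flatten := by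
  induction sl generalizing s with
  | nil => simp
  | cons c t ih => simp [ih, PySem.Set.mem_update, or_assoc]

theorem nodup_foldl_update (sl : List (List Int)) (s : PySem.Set Int) (h : s.Nodup) :
    (sl.foldl (fun s c => PySem.Set.update s c) s).Nodup := by
  induction sl generalizing s with
  | nil => exact h
  | cons c t ih => exact ih _ (PySem.Set.nodup_update _ _ h)

-- the gap-scan over a strictly increasing in-range boundary list produces the filtered range
theorem gaps_eq_filter (bs : List Int) (q : Int) :
    ∀ (acc : List Int) (start : Int), bs.Pairwise (· < ·) → (∀ v ∈ bs, start ≤ v ∧ v < q) →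
    ((bs.foldl (fun (p : List Int × Int) v => (p.1 ++ PySem.List.pyRange p.2 v 1, v + 1)) (acc, start)).1
      ++ PySem.List.pyRange
        (bs.foldl (fun (p : List Int × Int) v => (p.1 ++ PySem.List.pyRange p.2 v 1, v + 1)) (acc, start)).2 q 1)
    = acc ++ (PySem.List.pyRange start q 1).filter (fun x => !bs.contains x) := by
  induction bs with
  | nil => intro acc start _ _; simp
  | cons v t ih =>
    intro acc start hp hb
    obtain ⟨hsv, hvq⟩ := hb v (by simp)
    have hp' := (List.pairwise_cons.mp hp).2
    have hvt := (List.pairwise_cons.mp hp).1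
    rw [List.foldl_cons, ih _ _ hp'
      (fun w hw => ⟨by have := hvt w hw; omega, (hb w (by simp [hw])).2⟩)]
    rw [PySem.List.pyRange_one_append start v q hsv (by omega),
        PySem.List.pyRange_one_cons (by omega : v < q)]
    simp only [List.filter_append, List.filter_cons, List.append_assoc]
    have h1 : List.filter (fun x => !(v :: t).contains x) (PySem.List.pyRange start v 1)
        = PySem.List.pyRange start v 1 := by
      apply List.filter_eq_self.mpr
      intro x hx
      have hxv : x < v := (PySem.List.mem_pyRange_one.mp hx).2
      simp only [Bool.not_eq_eq_eq_not, Bool.not_true, List.contains_eq_mem,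
        decide_eq_false_iff_not, List.mem_cons]
      rintro (rfl | hxt)
      · omega
      · have := hvt x hxt; omega
    have h2 : (!(v :: t).contains v) = false := by simp
    have h3 : List.filter (fun x => !(v :: t).contains x) (PySem.List.pyRange (v + 1) q 1)
        = List.filter (fun x => !t.contains x) (PySem.List.pyRange (v + 1) q 1) := by
      apply List.filter_congr
      intro x hx
      have hxv : v + 1 ≤ x := (PySem.List.mem_pyRange_one.mp hx).1
      simp only [List.contains_eq_mem, List.mem_cons]
      have : x ≠ v := by omega
      simp [this]
    rw [h1, h2, h3]
    simp

theorem getUnvisitedPoint_spec : Claim_equal_getUnvisitedPoint := by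
  intro sl q d _
  show getUnvisitedPoint sl q d = getUnvisitedPoint_alt sl q d
  simp only [getUnvisitedPoint, getUnvisitedPoint_alt]
  set seen := sl.foldl (fun s c => PySem.Set.update s c) (PySem.Set.ofList [d]) with hseen
  set bs := PySem.List.sorted (seen.filter (fun v => decide (0 ≤ v) && decide (v < q))) (fun x => x) false with hbs
  have hmem_bs : ∀ x, x ∈ bs ↔ ((x = d ∨ x ∈ sl.flatten) ∧ 0 ≤ x ∧ x < q) := by
    intro x
    rw [hbs, PySem.List.mem_sorted, List.mem_filter, hseen, mem_foldl_update]
    simp [PySem.Set.mem_ofList, and_comm]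
  have hnodup : bs.Nodup := by
    rw [hbs]
    exact ((PySem.List.sorted_perm _ _ _).nodup_iff).mpr
      ((nodup_foldl_update sl _ (PySem.Set.nodup_ofList [d])).filter _)
  have hpair : bs.Pairwise (· < ·) := by
    have hle := PySem.List.sorted_pairwise
      (seen.filter (fun v => decide (0 ≤ v) && decide (v < q))) (fun x => x)
    rw [← hbs] at hle
    have := hnodup
    rw [List.Nodup] at this
    exact List.Pairwise.imp₂ (fun a b hab hne => lt_of_le_of_ne hab hne) hle this
  have hb : ∀ v ∈ bs, (0:Int) ≤ v ∧ v < q := fun v hv => ((hmem_bs v).mp hv).2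
  rw [gaps_eq_filter bs q [] 0 hpair hb, List.nil_append]
  rw [show sl.foldl (fun acc cluster => acc ++ cluster) ([] : List Int) = sl.flatten from by
    simpa using PySem.List.foldl_append_eq_flatten sl ([] : List Int)]
  apply List.filter_congr
  intro x hx
  have hxr := PySem.List.mem_pyRange_one.mp hx
  have hcx : (bs.contains x) = (([d] : List Int).contains x || sl.flatten.contains x) := by
    simp only [List.contains_eq_mem, List.mem_cons, List.not_mem_nil, or_false]
    by_cases hd : x = d
    · subst hd
      have hm : x ∈ bs := (hmem_bs x).mpr ⟨Or.inl rfl, hxr⟩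
      simp [hm]
    · by_cases hf : x ∈ sl.flatten
      · have hm : x ∈ bs := (hmem_bs x).mpr ⟨Or.inr hf, hxr⟩
        simp [hm, hf]
      · have hm : x ∉ bs := fun h => by
          rcases ((hmem_bs x).mp h).1 with h' | h'
          · exact hd h'
          · exact hf h'
        simp [hm, hd, hf]
  rw [hcx]
  cases h1 : ([d] : List Int).contains x <;> cases h2 : sl.flatten.contains x <;> simp
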